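-- pv_equiv track=rewrite | github.com/gusztimm/semanticanomalydetection-masterthesis | anomalydetection/anomalydetector.py | split_into_subtraces
-- ===== SOURCE A (Python) =====
-- def split_into_subtraces(variant):
--     variants = []
--     current = []
--     for event in variant:
--         if event not in current:
--             current.append(event)
--         else:
--             variants.append(current)
--             current = [event]
--     variants.append(current)
--     return variants
-- ===== SOURCE B (Python) =====
-- def split_into_subtraces(variant):
--     # Two-pass: (1) build prev[i] = index of the most recent earlier occurrence
--     # of variant[i] (None if first occurrence) via a last-position table;
--     # (2) cut exactly where that previous occurrence falls inside the current
--     # segment -- an integer comparison, no membership test on the segment.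
--     events = list(variant)
--     prev = []
--     last = {}
--     for i, e in enumerate(events):
--         prev.append(last.get(e))
--         last[e] = i
--     out = []
--     start = 0
--     for i, p in enumerate(prev):
--         if p is not None and p >= start:
--             out.append(events[start:i])
--             start = i
--     out.append(events[start:])
--     return out
-- ===== Notes on version B (the rewrite author's own statement) =====
-- stated objective: alternative
-- what changed: Replaces A's single accumulator loop (growing the current block and testing list membership on it) by two passes: the first builds, via a last-position dict, prev[i] = index of the most recent earlier occurrence of each event; the second determines the cut points purely by the integer comparison prev[i] >= start and emits slices, with no membership test on the block at all.
import Mathlib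
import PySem

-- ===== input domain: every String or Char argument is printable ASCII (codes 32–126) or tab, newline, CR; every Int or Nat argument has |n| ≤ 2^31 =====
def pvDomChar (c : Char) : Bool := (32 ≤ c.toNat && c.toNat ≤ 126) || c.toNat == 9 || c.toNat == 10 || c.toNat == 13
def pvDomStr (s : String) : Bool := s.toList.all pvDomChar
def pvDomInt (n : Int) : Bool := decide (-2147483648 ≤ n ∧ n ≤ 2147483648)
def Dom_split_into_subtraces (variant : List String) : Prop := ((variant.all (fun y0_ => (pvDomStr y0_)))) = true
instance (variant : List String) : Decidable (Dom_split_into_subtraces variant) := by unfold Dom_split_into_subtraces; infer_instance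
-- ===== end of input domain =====

-- B replaces A's single accumulator loop (growing the current block, list-membership
-- test per event) by two passes: a last-occurrence table giving prev[i], then cuts
-- decided by the integer comparison prev[i] >= start (no membership test on the block).

-- ===== PORT A =====
-- loop body of A: append to the current block, or close it and restart at this event
def pvStepA (p : List (List String) × List String) (event : String) : List (List String) × List String :=
  if p.2.contains event then (p.1 ++ [p.2], [event]) else (p.1, p.2 ++ [event])

def split_into_subtraces (variant : List String) : List (List String) :=
  let st := variant.foldl pvStepA ([], [])
  st.1 ++ [st.2]

-- ===== PORT B =====
-- first loop of Source B: for i, e in enumerate(events): prev.append(last.get(e)); last[e] = i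
-- (the enumerate index i is a nonnegative Python int, carried as Nat)
def pvPrevLoop : Nat → List String → PySem.Dict String Nat → List (Option Nat) → List (Option Nat)
  | _, [], _, acc => acc
  | i, e :: rest, last, acc => pvPrevLoop (i + 1) rest (last.insert e i) (acc ++ [last.get? e])

-- second loop of Source B: for i, p in enumerate(prev): if p is not None and p >= start: cut.
-- events[start:i] with 0 ≤ start ≤ i (loop invariant) is exactly drop/take.
def pvCutLoop : Nat → List (Option Nat) → List String → (List (List String) × Nat) → (List (List String) × Nat)
  | _, [], _, st => st
  | i, p :: rest, events, st =>
      match p with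
      | some j =>
          if st.2 ≤ j then
            pvCutLoop (i + 1) rest events (st.1 ++ [(events.drop st.2).take (i - st.2)], i)
          else pvCutLoop (i + 1) rest events st
      | none => pvCutLoop (i + 1) rest events st

def split_into_subtraces_alt (variant : List String) : List (List String) :=
  let prev := pvPrevLoop 0 variant PySem.Dict.empty []
  let st := pvCutLoop 0 prev variant ([], 0)
  st.1 ++ [variant.drop st.2]   -- out.append(events[start:]); return out

-- ===== PRECONDITION & SPEC =====
def Spec_split_into_subtraces (variant : List String) (out : List (List String)) : Prop := out = split_into_subtraces_alt variant
instance (variant : List String) (out : List (List String)) : Decidable (Spec_split_into_subtraces variant out) := by unfold Spec_split_into_subtraces; infer_instance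

-- ===== CLAIM (what is proved, stated in full; the proofs are below) =====
def Claim_equal_split_into_subtraces : Prop := ∀ (variant : List String), Dom_split_into_subtraces variant → Spec_split_into_subtraces variant (split_into_subtraces variant)

-- ===== LEMMAS AND PROOFS =====

-- cons-shaped form of the first loop (prev entries, one per remaining event)
def pvPrevS : Nat → List String → PySem.Dict String Nat → List (Option Nat)
  | _, [], _ => []
  | i, e :: rest, last => last.get? e :: pvPrevS (i + 1) rest (last.insert e i)

theorem pvPrevLoop_eq (es : List String) : ∀ (i : Nat) (d : PySem.Dict String Nat) (acc : List (Option Nat)),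
    pvPrevLoop i es d acc = acc ++ pvPrevS i es d := by
  induction es with
  | nil => intro i d acc; simp [pvPrevLoop, pvPrevS]
  | cons e rest ih => intro i d acc; simp [pvPrevLoop, pvPrevS, ih]

-- invariant of the last-occurrence dict after processing events[0:i]
def pvInv (events : List String) (d : PySem.Dict String Nat) (i : Nat) : Prop :=
  (∀ e j, d.get? e = some j → j < i ∧ events[j]? = some e) ∧
  (∀ k e, k < i → events[k]? = some e → ∃ j, d.get? e = some j ∧ k ≤ j)

theorem pvInv_zero (events : List String) : pvInv events PySem.Dict.empty 0 := by
  constructor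
  · intro e j h; simp [PySem.Dict.empty, PySem.Dict.get?] at h
  · intro k e hk; omega

theorem pvInv_step (events : List String) (d : PySem.Dict String Nat) (i : Nat)
    (hInv : pvInv events d i) (hi : i < events.length) :
    pvInv events (d.insert events[i] i) (i + 1) := by
  constructor
  · intro e j h
    by_cases he : e = events[i]
    · subst he
      rw [PySem.Dict.get?_insert_self] at h
      cases h
      exact ⟨by omega, by simp⟩
    · rw [PySem.Dict.get?_insert_of_ne _ _ he] at h
      have := hInv.1 e j h
      exact ⟨by omega, this.2⟩
  · intro k e hk hke
    by_cases he : e = events[i]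
    · subst he
      refine ⟨i, by rw [PySem.Dict.get?_insert_self], by
        by_cases hki : k = i
        · omega
        · have hk' : k < i := by omega
          obtain ⟨j, hj, hkj⟩ := hInv.2 k _ hk' hke
          have := hInv.1 _ j hj
          omega⟩
    · have hki : k ≠ i := by
        intro h; subst h
        rw [List.getElem?_eq_getElem hi] at hke
        exact he (Option.some.inj hke).symm
      obtain ⟨j, hj, hkj⟩ := hInv.2 k e (by omega) hke
      exact ⟨j, by rw [PySem.Dict.get?_insert_of_ne _ _ he]; exact hj, hkj⟩

-- membership in the slice events[start:i]
theorem pv_mem_slice (events : List String) (start i : Nat) (e : String)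
    (hsi : start ≤ i) (hi : i ≤ events.length) :
    e ∈ (events.drop start).take (i - start) ↔ ∃ k, start ≤ k ∧ k < i ∧ events[k]? = some e := by
  constructor
  · intro h
    obtain ⟨m, hm, hme⟩ := List.mem_iff_getElem.1 h
    have hm' : m < i - start := by
      have := hm; simp [List.length_take, List.length_drop] at this; omega
    have hlen : start + m < events.length := by omega
    refine ⟨start + m, by omega, by omega, ?_⟩
    rw [List.getElem?_eq_getElem hlen]
    rw [List.getElem_take, List.getElem_drop] at hme
    exact congrArg some hme
  · rintro ⟨k, hk1, hk2, hke⟩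
    have hkl : k < events.length := by omega
    rw [List.getElem?_eq_getElem hkl] at hke
    have hke' := Option.some.inj hke
    apply List.mem_iff_getElem.2
    refine ⟨k - start, by simp [List.length_take, List.length_drop]; omega, ?_⟩
    rw [List.getElem_take, List.getElem_drop]
    simpa [Nat.add_sub_cancel' hk1] using hke'

-- A's cut condition on the current block = B's integer test against prev[i]
theorem pv_cond_iff (events : List String) (d : PySem.Dict String Nat) (start i : Nat)
    (hInv : pvInv events d i) (hsi : start ≤ i) (hi : i < events.length) :
    events[i] ∈ (events.drop start).take (i - start) ↔
      ∃ j, d.get? events[i] = some j ∧ start ≤ j := by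
  rw [pv_mem_slice events start i _ hsi (by omega)]
  constructor
  · rintro ⟨k, hk1, hk2, hke⟩
    obtain ⟨j, hj, hkj⟩ := hInv.2 k _ hk2 hke
    exact ⟨j, hj, by omega⟩
  · rintro ⟨j, hj, hsj⟩
    have := hInv.1 _ j hj
    exact ⟨j, hsj, this.1, this.2⟩

-- the slice grows by one event when no cut happens
theorem pv_slice_snoc (events : List String) (start i : Nat) (hsi : start ≤ i) (hi : i < events.length) :
    (events.drop start).take (i - start) ++ [events[i]] = (events.drop start).take (i + 1 - start) := by
  have h1 : i + 1 - start = (i - start) + 1 := by omega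
  rw [h1, List.take_add_one]
  have h2 : (events.drop start)[i - start]? = some events[i] := by
    rw [List.getElem?_drop]
    rw [List.getElem?_eq_getElem (by omega : start + (i - start) < events.length)]
    congr 1
    congr 1
    omega
  rw [h2]
  rfl

-- coupling: A's remaining fold and B's remaining cut loop agree, block for block
theorem pv_couple (events : List String) : ∀ (n i start : Nat) (vs : List (List String)) (d : PySem.Dict String Nat),
    events.length - i = n → start ≤ i → i ≤ events.length → pvInv events d i →
    ((events.drop i).foldl pvStepA (vs, (events.drop start).take (i - start))).1 ++
      [((events.drop i).foldl pvStepA (vs, (events.drop start).take (i - start))).2] =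
    (pvCutLoop i (pvPrevS i (events.drop i) d) events (vs, start)).1 ++
      [events.drop (pvCutLoop i (pvPrevS i (events.drop i) d) events (vs, start)).2] := by
  intro n
  induction n using Nat.strong_induction_on with
  | _ n ih =>
    intro i start vs d hn hsi hile hInv
    by_cases hi : i < events.length
    · have hd : events.drop i = events[i] :: events.drop (i + 1) := List.drop_eq_getElem_cons hi
      rw [hd]
      simp only [pvPrevS, pvCutLoop, List.foldl_cons]
      have hInv' := pvInv_step events d i hInv hi
      by_cases hc : ∃ j, d.get? events[i] = some j ∧ start ≤ j
      · -- cut here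
        obtain ⟨j, hj, hsj⟩ := hc
        have hmem : events[i] ∈ (events.drop start).take (i - start) :=
          (pv_cond_iff events d start i hInv hsi hi).2 ⟨j, hj, hsj⟩
        simp only [hj]
        rw [if_pos hsj]
        have hstep : pvStepA (vs, (events.drop start).take (i - start)) events[i] =
            (vs ++ [(events.drop start).take (i - start)], [events[i]]) := by
          simp [pvStepA, hmem]
        rw [hstep]
        have hrec := ih (events.length - (i + 1)) (by omega) (i + 1) i
          (vs ++ [(events.drop start).take (i - start)]) (d.insert events[i] i)
          rfl (by omega) (by omega) hInv'
        have hcur : (events.drop i).take (i + 1 - i) = [events[i]] := by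
          rw [show i + 1 - i = 1 from by omega, hd]
          rfl
        rw [hcur] at hrec
        exact hrec
      · -- no cut
        have hnmem : events[i] ∉ (events.drop start).take (i - start) := fun h =>
          hc ((pv_cond_iff events d start i hInv hsi hi).1 h)
        have hstep : pvStepA (vs, (events.drop start).take (i - start)) events[i] =
            (vs, (events.drop start).take (i - start) ++ [events[i]]) := by
          simp [pvStepA, hnmem]
        have hrec := ih (events.length - (i + 1)) (by omega) (i + 1) start vs (d.insert events[i] i)
          rfl (by omega) (by omega) hInv'
        rw [hstep, pv_slice_snoc events start i hsi hi]
        rcases hg : d.get? events[i] with _ | j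
        · exact hrec
        · have hnsj : ¬ start ≤ j := fun h => hc ⟨j, hg, h⟩
          simp only [hnsj, if_false]
          exact hrec
    · have hd : events.drop i = [] := List.drop_eq_nil_of_le (by omega)
      have hie : i = events.length := by omega
      rw [hd]
      simp only [pvPrevS, pvCutLoop, List.foldl_nil]
      have : (events.drop start).take (i - start) = events.drop start := by
        apply List.take_of_length_le
        simp [List.length_drop]; omega
      rw [this]

-- ===== VERDICT (by name: the statement is the Claim_ definition above) =====
theorem split_into_subtraces_spec : Claim_equal_split_into_subtraces := by
  intro variant _
  show split_into_subtraces variant = split_into_subtraces_alt variant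
  unfold split_into_subtraces split_into_subtraces_alt
  rw [pvPrevLoop_eq]
  have := pv_couple variant variant.length 0 0 [] PySem.Dict.empty
    (by omega) (by omega) (by omega) (pvInv_zero variant)
  simpa using this
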